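-- pv_equiv track=rewrite | github.com/AstraZeneca/KAZU | kazu/utils/string_normalizer.py | is_symbol_like
-- ===== SOURCE A (Python) =====
-- def is_symbol_like(original_string: str) -> bool:
--     """Checks for ratio of upper to lower case characters, and numeric to alpha
--     characters.
--
--     :param original_string:
--     :return:
--     """
--     upper_count = 0
--     lower_count = 0
--     numeric_count = 0
--
--     tokens = original_string.split(" ")
--     token_count = len(tokens)
--
--     if token_count == 1 and len(original_string) <= 3:
--         return True
--
--     for i, char in enumerate(original_string):
--         if char.isalpha():
--             if char.isupper():
--                 upper_count += 1
--                 if i > 0 and token_count == 1: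
--                     # if is single token, and any char apart from first is upper, assume symbol
--                     return True
--
--             else:
--                 lower_count += 1
--
--         elif char.isnumeric():
--             if token_count == 1:
--                 # if is single token and has a number in it, assume symbol
--                 return True
--             numeric_count += 1
--
--     if upper_count >= lower_count:
--         return True
--     elif numeric_count >= (upper_count + lower_count):
--         return True
--     else:
--         return False
-- ===== SOURCE B (Python) =====
-- def is_symbol_like(original_string: str) -> bool:
--     if " " not in original_string:
--         # single token
--         if len(original_string) <= 3:
--             return True
--         if any(c.isnumeric() for c in original_string):
--             return True
--         if any(c.isalpha() and c.isupper() for c in original_string[1:]):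
--             return True
--         upper = 1 if original_string[0].isalpha() and original_string[0].isupper() else 0
--         lower = sum(1 for c in original_string if c.isalpha() and not c.isupper())
--         return upper >= lower
--     upper = sum(1 for c in original_string if c.isalpha() and c.isupper())
--     lower = sum(1 for c in original_string if c.isalpha() and not c.isupper())
--     numeric = sum(1 for c in original_string if c.isnumeric())
--     return upper >= lower or numeric >= upper + lower
-- ===== Notes on version B (the rewrite author's own statement) =====
-- stated objective: simpler
-- what changed: Replaces A's single fused index-tracking counting loop with early returns by a branch-first decomposition: the single-token case uses short-circuit any() existence checks plus a lowercase count, the multi-token case uses three plain per-class counting passes.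
import Mathlib
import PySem

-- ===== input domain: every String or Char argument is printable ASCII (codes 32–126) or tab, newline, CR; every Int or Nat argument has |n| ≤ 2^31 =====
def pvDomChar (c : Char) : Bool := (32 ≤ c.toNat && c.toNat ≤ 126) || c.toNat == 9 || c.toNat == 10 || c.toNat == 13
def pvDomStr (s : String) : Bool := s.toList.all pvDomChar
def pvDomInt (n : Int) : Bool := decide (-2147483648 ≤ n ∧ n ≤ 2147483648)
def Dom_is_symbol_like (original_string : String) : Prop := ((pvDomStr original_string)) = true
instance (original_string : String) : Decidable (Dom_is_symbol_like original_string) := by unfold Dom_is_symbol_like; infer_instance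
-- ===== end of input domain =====

-- B replaces A's single fused counting loop (with early returns) by a branch-first
-- decomposition: separate short-circuit existence checks in the single-token case and
-- plain per-class counting passes in the multi-token case (objective: simpler).

-- ===== PORT A =====
-- the fused loop of A: state (index, single-token flag, upper, lower, numeric), early returns
-- Python's char.isnumeric() coincides with Chars.isdigit on the printable-ASCII domain.
def pvLoopA : List Char → Nat → Bool → Nat → Nat → Nat → Bool
  | [], _, _, u, l, n =>
      if l ≤ u then true else if u + l ≤ n then true else false
  | c :: rest, i, single, u, l, n =>
      if PySem.Chars.isalpha c then
        if PySem.Chars.isupper c then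
          if decide (0 < i) && single then true
          else pvLoopA rest (i+1) single (u+1) l n
        else pvLoopA rest (i+1) single u (l+1) n
      else if PySem.Chars.isdigit c then
        if single then true
        else pvLoopA rest (i+1) single u l (n+1)
      else pvLoopA rest (i+1) single u l n

def is_symbol_like (original_string : String) : Bool :=
  let cs := original_string.toList
  let tokens := PySem.Chars.splitOn cs [' ']
  let token_count := tokens.length
  if token_count == 1 && decide (cs.length ≤ 3) then true
  else pvLoopA cs 0 (token_count == 1) 0 0 0

-- ===== PORT B =====
def is_symbol_like_alt (original_string : String) : Bool :=
  let cs := original_string.toList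
  if !(PySem.Chars.isIn [' '] cs) then
    -- single token
    if decide (cs.length ≤ 3) then true
    else if cs.any (fun c => PySem.Chars.isdigit c) then true
    else if (PySem.List.slice cs (some 1) none).any
              (fun c => PySem.Chars.isalpha c && PySem.Chars.isupper c) then true
    else
      let upper : Nat :=
        -- original_string[0]: the branch guarantees len > 3, so the index is in range
        match PySem.List.pyGet? cs (0 : Int) with
        | some c => if PySem.Chars.isalpha c && PySem.Chars.isupper c then 1 else 0
        | none => 0
      let lower := (cs.filter (fun c => PySem.Chars.isalpha c && !(PySem.Chars.isupper c))).length
      decide (lower ≤ upper)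
  else
    let upper := (cs.filter (fun c => PySem.Chars.isalpha c && PySem.Chars.isupper c)).length
    let lower := (cs.filter (fun c => PySem.Chars.isalpha c && !(PySem.Chars.isupper c))).length
    let numeric := (cs.filter (fun c => PySem.Chars.isdigit c)).length
    decide (lower ≤ upper) || decide (upper + lower ≤ numeric)

-- ===== PRECONDITION & SPEC =====
def Spec_is_symbol_like (original_string : String) (out : Bool) : Prop := out = is_symbol_like_alt original_string
instance (original_string : String) (out : Bool) : Decidable (Spec_is_symbol_like original_string out) := by unfold Spec_is_symbol_like; infer_instance

-- ===== CLAIM (what is proved, stated in full; the proofs are below) =====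
def Claim_equal_is_symbol_like : Prop := ∀ (original_string : String), Dom_is_symbol_like original_string → Spec_is_symbol_like original_string (is_symbol_like original_string)

-- ===== LEMMAS AND PROOFS =====

-- character-class abbreviations used by the proofs
def pvUpA (c : Char) : Bool := PySem.Chars.isalpha c && PySem.Chars.isupper c
def pvLow (c : Char) : Bool := PySem.Chars.isalpha c && !(PySem.Chars.isupper c)
def pvSym (c : Char) : Bool := PySem.Chars.isdigit c || pvUpA c

theorem alpha_not_digit (c : Char) (h : PySem.Chars.isalpha c = true) :
    PySem.Chars.isdigit c = false := by
  have hA : ('A':Char).val.toNat = 65 := rfl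
  have hZ : ('Z':Char).val.toNat = 90 := rfl
  have ha : ('a':Char).val.toNat = 97 := rfl
  have hz : ('z':Char).val.toNat = 122 := rfl
  have h0 : ('0':Char).val.toNat = 48 := rfl
  have h9 : ('9':Char).val.toNat = 57 := rfl
  simp only [PySem.Chars.isalpha, PySem.Chars.isdigit, PySem.Chars.isupper, PySem.Chars.islower,
    Bool.or_eq_true, Bool.and_eq_true, decide_eq_true_eq, Char.le_def, UInt32.le_iff_toNat_le] at *
  rcases h with h | h <;>
  · simp only [Bool.and_eq_false_iff, decide_eq_false_iff_not, Char.le_def, UInt32.le_iff_toNat_le]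
    omega

theorem any_orB (l : List Char) (p q : Char → Bool) :
    l.any (fun c => p c || q c) = (l.any p || l.any q) := by
  induction l with
  | nil => simp
  | cons c t ih => simp [ih, Bool.or_assoc, Bool.or_left_comm]

-- length of splitOn.go on separator [' ']: one piece per space, plus one
theorem go_space_length (fuel : Nat) : ∀ (l cur : List Char) (acc : List (List Char)),
    l.length < fuel →
    (PySem.Chars.splitOn.go [' '] fuel l cur acc).length = acc.length + 1 + l.count ' ' := by
  induction fuel with
  | zero => intro l cur acc h; omega
  | succ f ih =>
    intro l cur acc h
    cases l with
    | nil => simp [PySem.Chars.splitOn.go]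
    | cons c rest =>
      by_cases hc : c = ' '
      · subst hc
        have hpre : ([' '].isPrefixOf (' ' :: rest)) = true := by
          simp [List.isPrefixOf_iff_prefix, List.cons_prefix_cons]
        simp only [PySem.Chars.splitOn.go, hpre, if_true, List.length_singleton,
          List.drop_succ_cons, List.drop_zero]
        simp only [List.length_cons] at h
        rw [ih rest [] (cur.reverse :: acc) (by omega)]
        simp [List.count_cons] <;> omega
      · have hpre : ([' '].isPrefixOf (c :: rest)) = false := by
          simp only [List.isPrefixOf, Bool.and_eq_false_iff, beq_eq_false_iff_ne, ne_eq]
          exact Or.inl fun h' => hc h'.symm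
        simp only [PySem.Chars.splitOn.go, hpre, Bool.false_eq_true, if_false]
        simp only [List.length_cons] at h
        rw [ih rest (c :: cur) acc (by omega)]
        simp [List.count_cons, hc]

theorem splitOn_space_length (cs : List Char) :
    (PySem.Chars.splitOn cs [' ']).length = 1 + cs.count ' ' := by
  unfold PySem.Chars.splitOn
  rw [go_space_length (cs.length + 1) cs [] [] (by omega)]
  simp

theorem mem_iff_isIn (cs : List Char) : PySem.Chars.isIn [' '] cs = true ↔ ' ' ∈ cs := by
  rw [PySem.Chars.isIn_iff_infix]
  constructor
  · intro h; exact h.subset (List.mem_singleton_self ' ')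
  · intro h; obtain ⟨s, t, rfl⟩ := List.append_of_mem h; exact ⟨s, t, by simp⟩

-- the fused loop, multi-token mode: pure counting
theorem loop_multi (cs : List Char) : ∀ (i u l n : Nat),
    pvLoopA cs i false u l n =
      (decide (l + cs.countP pvLow ≤ u + cs.countP pvUpA) ||
       decide ((u + cs.countP pvUpA) + (l + cs.countP pvLow) ≤ n + cs.countP PySem.Chars.isdigit)) := by
  induction cs with
  | nil =>
    intro i u l n
    simp only [pvLoopA, List.countP_nil, Nat.add_zero]
    rw [Bool.eq_iff_iff]
    split_ifs <;> simp <;> omega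
  | cons c rest ih =>
    intro i u l n
    by_cases ha : PySem.Chars.isalpha c = true
    · by_cases hu : PySem.Chars.isupper c = true
      · simp only [pvLoopA, ha, hu, if_true, Bool.and_false, Bool.false_eq_true, if_false, ih]
        rw [Bool.eq_iff_iff]
        simp [List.countP_cons, pvUpA, pvLow, ha, hu, alpha_not_digit c ha] <;> omega
      · simp only [pvLoopA, ha, hu, Bool.false_eq_true, if_true, if_false, ih]
        rw [Bool.eq_iff_iff]
        simp [List.countP_cons, pvUpA, pvLow, ha, hu, alpha_not_digit c ha] <;> omega
    · by_cases hd : PySem.Chars.isdigit c = true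
      · simp only [pvLoopA, ha, hd, Bool.false_eq_true, if_false, if_true, ih]
        rw [Bool.eq_iff_iff]
        simp [List.countP_cons, pvUpA, pvLow, ha, hd] <;> omega
      · simp only [pvLoopA, ha, hd, Bool.false_eq_true, if_false, ih]
        simp [List.countP_cons, pvUpA, pvLow, ha, hd]

-- the fused loop, single-token mode, past the first character: any symbol char returns True
theorem loop_single (cs : List Char) : ∀ (i u l n : Nat), 1 ≤ i →
    pvLoopA cs i true u l n =
      (cs.any pvSym ||
        (decide (l + cs.countP pvLow ≤ u) || decide (u + (l + cs.countP pvLow) ≤ n))) := by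
  induction cs with
  | nil =>
    intro i u l n _
    simp only [pvLoopA, List.any_nil, List.countP_nil, Nat.add_zero, Bool.false_or]
    rw [Bool.eq_iff_iff]
    split_ifs <;> simp <;> omega
  | cons c rest ih =>
    intro i u l n hi
    by_cases ha : PySem.Chars.isalpha c = true
    · by_cases hu : PySem.Chars.isupper c = true
      · have hg : (decide (0 < i) && true) = true := by simp; omega
        simp [pvLoopA, ha, hu, hg, List.any_cons, pvSym, pvUpA]
      · simp only [pvLoopA, ha, hu, Bool.false_eq_true, if_true, if_false,
          ih _ _ _ _ (by omega : 1 ≤ i + 1)]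
        rw [Bool.eq_iff_iff]
        simp [List.any_cons, pvSym, pvUpA, pvLow, List.countP_cons, ha, hu,
          alpha_not_digit c ha]
        exact or_congr Iff.rfl (by omega)
    · by_cases hd : PySem.Chars.isdigit c = true
      · simp [pvLoopA, ha, hd, List.any_cons, pvSym]
      · simp only [pvLoopA, ha, hd, Bool.false_eq_true, if_false,
          ih _ _ _ _ (by omega : 1 ≤ i + 1)]
        simp [List.any_cons, pvSym, pvUpA, pvLow, List.countP_cons, ha, hd]

-- the single-token branch with the first character split off, stated over B's raw predicates
theorem head_case (c : Char) (rest : List Char) :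
    pvLoopA (c :: rest) 0 true 0 0 0 =
      (if (c :: rest).any (fun c => PySem.Chars.isdigit c) then true
       else if rest.any (fun c => PySem.Chars.isalpha c && PySem.Chars.isupper c) then true
       else decide
         (((c :: rest).filter (fun c => PySem.Chars.isalpha c && !(PySem.Chars.isupper c))).length ≤
           (if PySem.Chars.isalpha c && PySem.Chars.isupper c then 1 else 0))) := by
  have hany : ∀ l : List Char, l.any pvSym =
      (l.any (fun c => PySem.Chars.isdigit c) || l.any (fun c => PySem.Chars.isalpha c && PySem.Chars.isupper c)) := by
    intro l
    rw [show pvSym = fun c => PySem.Chars.isdigit c || (PySem.Chars.isalpha c && PySem.Chars.isupper c) from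
      funext fun c => by simp [pvSym, pvUpA]]
    exact any_orB l _ _
  have hfilt : ∀ l : List Char,
      (l.filter (fun c => PySem.Chars.isalpha c && !(PySem.Chars.isupper c))).length = l.countP pvLow := by
    intro l
    rw [List.countP_eq_length_filter]
    congr 1
  by_cases ha : PySem.Chars.isalpha c = true
  · have hd : PySem.Chars.isdigit c = false := alpha_not_digit c ha
    by_cases hu : PySem.Chars.isupper c = true
    · simp only [pvLoopA, ha, hu, if_true, Nat.lt_irrefl, decide_false, Bool.false_and,
        Bool.false_eq_true, if_false, loop_single rest 1 1 0 0 (le_refl 1), hany,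
        List.any_cons, hd, Bool.false_or, List.filter_cons, ha, hu, Bool.and_self,
        Bool.not_true, Bool.and_false, hfilt]
      by_cases hD : rest.any (fun c => PySem.Chars.isdigit c) = true <;>
        by_cases hU : rest.any (fun c => PySem.Chars.isalpha c && PySem.Chars.isupper c) = true <;>
          simp [hD, hU]
    · simp only [pvLoopA, ha, hu, Bool.false_eq_true, if_true, if_false,
        loop_single rest 1 0 1 0 (le_refl 1), hany, List.any_cons, hd, Bool.false_or,
        List.filter_cons, Bool.and_self, Bool.not_false, Bool.and_true, Bool.and_false,
        List.length_cons, hfilt]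
      by_cases hD : rest.any (fun c => PySem.Chars.isdigit c) = true <;>
        by_cases hU : rest.any (fun c => PySem.Chars.isalpha c && PySem.Chars.isupper c) = true <;>
          simp [hD, hU, ha, hu]
  · by_cases hd : PySem.Chars.isdigit c = true
    · simp [pvLoopA, ha, hd, List.any_cons]
    · simp only [pvLoopA, ha, hd, Bool.false_eq_true, if_false,
        loop_single rest 1 0 0 0 (le_refl 1), hany, List.any_cons, Bool.false_or,
        List.filter_cons, hfilt]
      by_cases hD : rest.any (fun c => PySem.Chars.isdigit c) = true <;>
        by_cases hU : rest.any (fun c => PySem.Chars.isalpha c && PySem.Chars.isupper c) = true <;>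
          simp [hD, hU, ha, hd]
      exact forall₂_congr fun a _ => by simp [pvLow]

-- ===== VERDICT (by name: the statement is the Claim_ definition above) =====
theorem is_symbol_like_spec : Claim_equal_is_symbol_like := by
  intro s _
  unfold Spec_is_symbol_like is_symbol_like is_symbol_like_alt
  generalize s.toList = cs
  by_cases hmem : ' ' ∈ cs
  · -- multi-token
    have hcnt : cs.count ' ' ≠ 0 := by simpa [List.count_eq_zero] using hmem
    have htc : ((PySem.Chars.splitOn cs [' ']).length == 1) = false := by
      simp [splitOn_space_length]; omega
    have hin : PySem.Chars.isIn [' '] cs = true := (mem_iff_isIn cs).2 hmem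
    simp only [htc, hin, Bool.false_and, Bool.false_eq_true, if_false, Bool.not_true]
    rw [loop_multi]
    unfold pvUpA pvLow
    simp [← List.countP_eq_length_filter]
  · -- single token
    have hcnt : cs.count ' ' = 0 := List.count_eq_zero.2 hmem
    have htc : ((PySem.Chars.splitOn cs [' ']).length == 1) = true := by
      simp [splitOn_space_length, hcnt]
    have hin : PySem.Chars.isIn [' '] cs = false := by
      cases h : PySem.Chars.isIn [' '] cs
      · rfl
      · exact absurd ((mem_iff_isIn cs).1 h) hmem
    simp only [htc, hin, Bool.true_and, Bool.not_false, if_true]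
    by_cases hlen : cs.length ≤ 3
    · simp [hlen]
    · simp only [hlen, decide_false, Bool.false_eq_true, if_false]
      obtain ⟨c, rest, rfl⟩ : ∃ c rest, cs = c :: rest := by
        cases cs with
        | nil => simp at hlen
        | cons c rest => exact ⟨c, rest, rfl⟩
      rw [PySem.List.slice_from _ (by norm_num : (0:Int) ≤ 1)]
      have hget : PySem.List.pyGet? (c :: rest) (0 : Int) = some c := by
        simp [PySem.List.pyGet?, PySem.List.pyIdx?]
      simp only [Int.toNat_one, List.drop_succ_cons, List.drop_zero, hget]
      exact head_case c rest
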